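-- pv_equiv track=rewrite | github.com/ana-schoffen/Projeto-PIC-2020-2021 | primeiraPessoa.py | separa_c_s
-- ===== SOURCE A (Python) =====
-- def separa_c_s(lista):
--     lista_c = []
--     lista_s = []
--
--     x = len(lista)
--
--     for i in range(x):
--         y = len(lista[i])
--         for j in range(y):
--             lista_c.append(lista[i][j][0])
--             lista_s.append(lista[i][j][1])
--     return lista_c, lista_s
-- ===== SOURCE B (Python) =====
-- def _cols(seq):
--     # divide and conquer: split in half, recurse on each half, concatenate
--     n = len(seq)
--     if n == 0:
--         return [], []
--     if n == 1:
--         c, s = seq[0]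
--         return [c], [s]
--     mid = n // 2
--     lc, ls = _cols(seq[:mid])
--     rc, rs = _cols(seq[mid:])
--     return lc + rc, ls + rs
--
-- def _rows(rows):
--     # same divide-and-conquer over the list of rows
--     n = len(rows)
--     if n == 0:
--         return [], []
--     if n == 1:
--         return _cols(rows[0])
--     mid = n // 2
--     lc, ls = _rows(rows[:mid])
--     rc, rs = _rows(rows[mid:])
--     return lc + rc, ls + rs
--
-- def separa_c_s(lista):
--     return _rows(lista)
-- ===== Notes on version B (the rewrite author's own statement) =====
-- stated objective: alternative
-- what changed: Replaces A's index-driven nested accumulating loops by a divide-and-conquer recursion that halves the list (and each row), recurses on both halves and concatenates the resulting column pairs.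
import Mathlib
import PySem

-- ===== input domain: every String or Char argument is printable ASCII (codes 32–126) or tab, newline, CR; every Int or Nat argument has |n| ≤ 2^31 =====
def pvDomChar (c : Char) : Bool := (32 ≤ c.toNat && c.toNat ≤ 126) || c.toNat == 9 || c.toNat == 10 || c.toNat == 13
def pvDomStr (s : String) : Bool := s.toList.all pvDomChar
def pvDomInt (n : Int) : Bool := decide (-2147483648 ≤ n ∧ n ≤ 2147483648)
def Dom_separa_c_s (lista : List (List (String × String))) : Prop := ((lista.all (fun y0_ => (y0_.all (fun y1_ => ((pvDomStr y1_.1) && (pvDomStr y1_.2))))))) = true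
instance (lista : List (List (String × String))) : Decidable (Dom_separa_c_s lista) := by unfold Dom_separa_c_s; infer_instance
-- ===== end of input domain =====

-- B replaces A's index-driven nested accumulating loops by a divide-and-conquer recursion
-- (halve the list and each row, recurse on both halves, concatenate) — alternative algorithm.


-- ===== PORT A =====
-- for i in range(x): for j in range(y): append lista[i][j][0] / [1]
def separa_c_s (lista : List (List (String × String))) : List String × List String :=
  let x : Int := lista.length
  (PySem.List.pyRange 0 x 1).foldl
    (fun (acc : List String × List String) i =>
      let row := PySem.List.pyGetD lista i []
      let y : Int := row.length
      (PySem.List.pyRange 0 y 1).foldl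
        (fun (acc : List String × List String) j =>
          let p := PySem.List.pyGetD row j ("", "")
          (acc.1 ++ [p.1], acc.2 ++ [p.2]))
        acc)
    ([], [])

-- ===== PORT B =====
-- _cols: n==0 / n==1 base cases; else mid = n//2, recurse on seq[:mid] and seq[mid:], concatenate.
-- Slices with the nonnegative bound mid are exactly take/drop (PySem.List.slice_to_natCast /
-- slice_from_natCast), and n//2 on the nonnegative n is Nat division, so the port uses them directly.
def pvCols (seq : List (String × String)) : List String × List String :=
  if _h0 : seq.length = 0 then ([], [])
  else if _h1 : seq.length = 1 then
    let p := PySem.List.pyGetD seq (0 : Int) ("", "")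
    ([p.1], [p.2])
  else
    let l := pvCols (seq.take (seq.length / 2))
    let r := pvCols (seq.drop (seq.length / 2))
    (l.1 ++ r.1, l.2 ++ r.2)
termination_by seq.length
decreasing_by
  · simp [List.length_take]; omega
  · simp [List.length_drop]; omega

-- _rows: same divide-and-conquer over the list of rows
def pvRows (rows : List (List (String × String))) : List String × List String :=
  if _h0 : rows.length = 0 then ([], [])
  else if _h1 : rows.length = 1 then
    pvCols (PySem.List.pyGetD rows (0 : Int) [])
  else
    let l := pvRows (rows.take (rows.length / 2))
    let r := pvRows (rows.drop (rows.length / 2))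
    (l.1 ++ r.1, l.2 ++ r.2)
termination_by rows.length
decreasing_by
  · simp [List.length_take]; omega
  · simp [List.length_drop]; omega

def separa_c_s_alt (lista : List (List (String × String))) : List String × List String :=
  pvRows lista

-- ===== PRECONDITION & SPEC =====
def Spec_separa_c_s (lista : List (List (String × String))) (out : List String × List String) : Prop := out = separa_c_s_alt lista
instance (lista : List (List (String × String))) (out : List String × List String) : Decidable (Spec_separa_c_s lista out) := by unfold Spec_separa_c_s; infer_instance

-- ===== CLAIM (what is proved, stated in full; the proofs are below) =====
def Claim_equal_separa_c_s : Prop := ∀ (lista : List (List (String × String))), Dom_separa_c_s lista → Spec_separa_c_s lista (separa_c_s lista)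

-- ===== LEMMAS AND PROOFS =====

-- the inner loop over range(len(row)) appends row's firsts and seconds
theorem pv_inner (row : List (String × String)) (acc : List String × List String) :
    (PySem.List.pyRange 0 (row.length : Int) 1).foldl
        (fun (acc : List String × List String) j =>
          let p := PySem.List.pyGetD row j ("", "")
          (acc.1 ++ [p.1], acc.2 ++ [p.2])) acc
      = (acc.1 ++ row.map Prod.fst, acc.2 ++ row.map Prod.snd) := by
  rw [PySem.List.foldl_pyRange_zero_pyGetD' row ("", "")
    (fun (acc : List String × List String) p => (acc.1 ++ [p.1], acc.2 ++ [p.2])) acc]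
  induction row generalizing acc with
  | nil => simp
  | cons h t ih => simp [List.foldl_cons, ih]

theorem pv_outer (lista : List (List (String × String))) (acc : List String × List String) :
    (PySem.List.pyRange 0 (lista.length : Int) 1).foldl
      (fun (acc : List String × List String) i =>
        let row := PySem.List.pyGetD lista i []
        (PySem.List.pyRange 0 (row.length : Int) 1).foldl
          (fun (acc : List String × List String) j =>
            let p := PySem.List.pyGetD row j ("", "")
            (acc.1 ++ [p.1], acc.2 ++ [p.2])) acc) acc
      = (acc.1 ++ (lista.flatMap (fun sub => sub)).map Prod.fst,
         acc.2 ++ (lista.flatMap (fun sub => sub)).map Prod.snd) := by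
  rw [PySem.List.foldl_pyRange_zero_pyGetD' lista []
    (fun (acc : List String × List String) row =>
      (PySem.List.pyRange 0 (row.length : Int) 1).foldl
        (fun (acc : List String × List String) j =>
          let p := PySem.List.pyGetD row j ("", "")
          (acc.1 ++ [p.1], acc.2 ++ [p.2])) acc) acc]
  induction lista generalizing acc with
  | nil => simp
  | cons h t ih =>
    rw [List.foldl_cons, pv_inner, ih]
    simp [List.append_assoc]

-- divide-and-conquer over a row produces the two column projections
theorem pvCols_eq (seq : List (String × String)) :
    pvCols seq = (seq.map Prod.fst, seq.map Prod.snd) := by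
  fun_induction pvCols seq with
  | case1 seq h0 => simp [List.length_eq_zero_iff.mp h0]
  | case2 seq h0 h1 =>
    obtain ⟨p, rfl⟩ := List.length_eq_one_iff.mp h1
    rfl
  | case3 seq h0 h1 l r iht ihd =>
    simp only [l, r, iht, ihd, Prod.mk.injEq]
    constructor <;> rw [← List.map_append, List.take_append_drop]

-- divide-and-conquer over the rows produces the column projections of the flattening
theorem pvRows_eq (rows : List (List (String × String))) :
    pvRows rows = ((rows.flatMap (fun sub => sub)).map Prod.fst,
                   (rows.flatMap (fun sub => sub)).map Prod.snd) := by
  fun_induction pvRows rows with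
  | case1 rows h0 => simp [List.length_eq_zero_iff.mp h0]
  | case2 rows h0 h1 =>
    obtain ⟨row, rfl⟩ := List.length_eq_one_iff.mp h1
    show pvCols (PySem.List.pyGetD [row] (0 : Int) []) = _
    have : PySem.List.pyGetD [row] (0 : Int) [] = row := rfl
    simp [this, pvCols_eq]
  | case3 rows h0 h1 l r iht ihd =>
    simp only [l, r, iht, ihd, Prod.mk.injEq]
    constructor <;> rw [← List.map_append, ← List.flatMap_append, List.take_append_drop]

-- ===== VERDICT (by name: the statement is the Claim_ definition above) =====
theorem separa_c_s_spec : Claim_equal_separa_c_s := by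
  intro lista _
  unfold Spec_separa_c_s separa_c_s separa_c_s_alt
  rw [pv_outer, pvRows_eq]
  simp
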